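-- pv_equiv track=rewrite | github.com/pypi-data/pypi-mirror-398 | packages/urlpattern-py/urlpattern_py-0.2.0-py3-none-any.whl/urlpattern/patterns.py | _normalize_hostname_escapes
-- ===== SOURCE A (Python) =====
-- def _normalize_hostname_escapes(value: str) -> str:
--     """Normalize hostname escapes to match URLPattern parsing rules."""
--     special = set(".*+?^${}()|[]:\\")
--     normalized = []
--     i = 0
--     while i < len(value):
--         char = value[i]
--         if char == "\\" and i + 1 < len(value):
--             next_char = value[i + 1]
--             if (
--                 next_char.isalnum() or next_char in ("_", "$") or ord(next_char) > 127
--             ) and next_char not in special: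
--                 normalized.append("\\\\")
--                 normalized.append(next_char)
--                 i += 2
--                 continue
--             normalized.append(char)
--             normalized.append(next_char)
--             i += 2
--             continue
--         normalized.append(char)
--         i += 1
--     return "".join(normalized)
-- ===== SOURCE B (Python) =====
-- import re
--
-- def _normalize_hostname_escapes(value: str) -> str:
--     """Normalize hostname escapes to match URLPattern parsing rules."""
--     special = set(".*+?^${}()|[]:\\")
--
--     def repl(match):
--         c = match.group(1)
--         if (c.isalnum() or c in ("_", "$") or ord(c) > 127) and c not in special:
--             return "\\\\" + c
--         return "\\" + c
--
--     return re.sub(r"\\(.)", repl, value)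
-- ===== Notes on version B (the rewrite author's own statement) =====
-- stated objective: idiomatic
-- what changed: Replaced the manual index loop with accumulator list by a single re.sub(r'\\(.)', repl, value) call whose repl callback decides whether to double the backslash; the scan runs in the C regex engine instead of a Python-level while loop.
import Mathlib
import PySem

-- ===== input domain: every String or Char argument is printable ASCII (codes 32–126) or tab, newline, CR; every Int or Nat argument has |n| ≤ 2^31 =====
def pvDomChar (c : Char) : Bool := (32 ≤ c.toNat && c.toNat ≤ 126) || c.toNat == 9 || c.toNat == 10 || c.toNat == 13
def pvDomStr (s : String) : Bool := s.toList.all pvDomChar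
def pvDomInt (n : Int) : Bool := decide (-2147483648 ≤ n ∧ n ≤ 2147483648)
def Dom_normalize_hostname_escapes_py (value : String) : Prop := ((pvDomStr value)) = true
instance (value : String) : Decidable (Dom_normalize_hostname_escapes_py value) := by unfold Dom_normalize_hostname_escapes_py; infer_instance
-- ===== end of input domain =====

-- B replaces A's manual index loop by a regex substitution (re.sub r"\(.)" with a repl callback); return value only, no side effects.

-- the `special` set literal shared by both Pythons
def pvSpecial : List Char := ".*+?^${}()|[]:\\".toList

-- next_char.isalnum() or next_char in ("_","$") or ord(next_char) > 127, and next_char not in special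
def pvDoubles (n : Char) : Bool :=
  (PySem.Chars.isalnum n || n = '_' || n = '$' || decide (n.toNat > 127)) && !(n ∈ pvSpecial)

-- ===== PORT A =====
-- A's while loop over the character list: each iteration consumes one char, or two when a
-- backslash has a following char; `normalized` is the accumulated output.
def pvLoopA : List Char → List Char
  | [] => []
  | [c] => [c]                    -- char == "\\" but i + 1 = len(value): the final else branch
  | c :: n :: rest =>
    if c = '\\' then
      if pvDoubles n then '\\' :: '\\' :: n :: pvLoopA rest
      else c :: n :: pvLoopA rest
    else c :: pvLoopA (n :: rest)

def normalize_hostname_escapes_py (value : String) : String :=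
  String.ofList (pvLoopA value.toList)

-- ===== PORT B =====
-- repl(match): "\\\\"+c when the doubling condition holds, else "\\"+c
def pvRepl (n : Char) : List Char :=
  if pvDoubles n then ['\\', '\\', n] else ['\\', n]

-- re.sub scan for the pattern \\(.): at each position, if a backslash is followed by a
-- character that '.' matches (any char except '\n'), emit repl on the match and continue
-- after it; otherwise pass the character through.
def pvSubB : List Char → List Char
  | [] => []
  | [c] => [c]
  | c :: n :: rest =>
    if c = '\\' ∧ n ≠ '\n' then pvRepl n ++ pvSubB rest
    else c :: pvSubB (n :: rest)

def normalize_hostname_escapes_py_alt (value : String) : String :=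
  String.ofList (pvSubB value.toList)

-- ===== PRECONDITION & SPEC =====
def Spec_normalize_hostname_escapes_py (value : String) (out : String) : Prop := out = normalize_hostname_escapes_py_alt value
instance (value : String) (out : String) : Decidable (Spec_normalize_hostname_escapes_py value out) := by unfold Spec_normalize_hostname_escapes_py; infer_instance

-- ===== CLAIM (what is proved, stated in full; the proofs are below) =====
def Claim_equal_normalize_hostname_escapes_py : Prop := ∀ (value : String), Dom_normalize_hostname_escapes_py value → Spec_normalize_hostname_escapes_py value (normalize_hostname_escapes_py value)

-- ===== LEMMAS AND PROOFS =====

-- '\n' never satisfies the doubling condition, so A keeps "\\\n" verbatim — exactly what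
-- re.sub does when '.' refuses to match the '\n'.
theorem pvDoubles_newline : pvDoubles '\n' = false := by decide

theorem pvLoopA_eq_pvSubB (l : List Char) : pvLoopA l = pvSubB l := by
  fun_induction pvLoopA l with
  | case1 => rfl
  | case2 c => rfl
  | case3 n rest hd ih =>
    -- backslash, doubling condition holds; '\n' never doubles so n ≠ '\n'
    have hn : n ≠ '\n' := by intro h; rw [h, pvDoubles_newline] at hd; exact absurd hd (by simp)
    simp [pvSubB, hn, pvRepl, hd, ih]
  | case4 n rest hd ih =>
    -- backslash, no doubling: A emits "\\"+n; B either matched (repl's else) or, for n = '\n',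
    -- passed both characters through unmatched — the same two characters either way
    by_cases hn : n = '\n'
    · subst hn
      have h2 : pvSubB ('\\' :: '\n' :: rest) = '\\' :: pvSubB ('\n' :: rest) := by
        simp [pvSubB]
      rw [h2]
      cases rest with
      | nil => simp [pvSubB, pvLoopA]
      | cons m t => simp [pvSubB] at ih ⊢; simp [ih]
    · simp [pvSubB, hn, pvRepl, hd, ih]
  | case5 c n rest hc ih =>
    simp [pvSubB, hc, ih]

-- ===== VERDICT (by name: the statement is the Claim_ definition above) =====
theorem normalize_hostname_escapes_py_spec : Claim_equal_normalize_hostname_escapes_py := by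
  intro value _
  unfold Spec_normalize_hostname_escapes_py normalize_hostname_escapes_py normalize_hostname_escapes_py_alt
  rw [pvLoopA_eq_pvSubB]
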